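-- pv_equiv track=rewrite | github.com/Beliavsky/Pure-Fortran | xunset.py | full_shape_footprint
-- ===== SOURCE A (Python) =====
-- from itertools import product
-- from typing import Dict, Iterable, List, Optional, Set, Tuple
--
-- MAX_TRACKED_ELEMENTS = 200000
--
-- def shape_element_count(shape: Tuple[int, ...]) -> int:
--     """Return total number of elements in an array shape."""
--     n = 1
--     for d in shape:
--         n *= d
--     return n
--
-- def full_shape_footprint(shape: Tuple[int, ...]) -> Optional[Set[Tuple[int, ...]]]:
--     """Return full tuple footprint when shape is small enough, else None."""
--     total = shape_element_count(shape)
--     if total > MAX_TRACKED_ELEMENTS: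
--         return None
--     out: Set[Tuple[int, ...]] = set()
--     for idx in product(*[range(1, d + 1) for d in shape]):
--         out.add(tuple(int(v) for v in idx))
--     return out
-- ===== SOURCE B (Python) =====
-- MAX_TRACKED_ELEMENTS = 200000
--
-- def full_shape_footprint(shape):
--     """Return full tuple footprint when shape is small enough, else None.
--
--     Rank decoding: instead of enumerating the Cartesian product, enumerate
--     linear element ranks 0..total-1 and decode each rank into its 1-based
--     mixed-radix index tuple with divmod.
--     """
--     total = 1
--     for d in shape:
--         total *= d
--     if total > MAX_TRACKED_ELEMENTS:
--         return None
--     if any(d <= 0 for d in shape):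
--         return set()
--     out = set()
--     for k in range(total):
--         digits = []
--         r = k
--         for d in reversed(shape):
--             r, q = divmod(r, d)
--             digits.append(q + 1)
--         out.add(tuple(reversed(digits)))
--     return out
-- ===== Notes on version B (the rewrite author's own statement) =====
-- stated objective: alternative
-- what changed: Replaces itertools.product enumeration of index tuples by rank decoding: B iterates the linear element ranks 0..total-1 and decodes each rank into its 1-based index tuple with repeated divmod over the reversed shape (with a direct empty-set result when some dimension is nonpositive).
import Mathlib
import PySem

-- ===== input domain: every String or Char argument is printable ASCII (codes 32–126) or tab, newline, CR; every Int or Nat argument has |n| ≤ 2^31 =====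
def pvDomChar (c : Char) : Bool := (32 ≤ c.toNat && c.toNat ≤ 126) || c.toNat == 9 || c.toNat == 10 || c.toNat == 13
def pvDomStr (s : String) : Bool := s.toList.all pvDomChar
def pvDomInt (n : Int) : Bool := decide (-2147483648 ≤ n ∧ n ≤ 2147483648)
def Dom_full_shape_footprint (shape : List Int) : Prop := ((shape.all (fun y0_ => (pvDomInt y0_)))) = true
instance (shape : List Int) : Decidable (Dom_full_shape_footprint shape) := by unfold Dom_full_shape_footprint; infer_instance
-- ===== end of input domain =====

-- B replaces the Cartesian-product enumeration by rank decoding: it enumerates the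
-- linear ranks 0..total-1 and decodes each rank into its 1-based index tuple with
-- repeated divmod (objective: alternative algorithm, same asymptotic cost).

-- ===== PORT A =====
-- helper shape_element_count: n = 1; for d in shape: n *= d
def shape_element_count (shape : List Int) : Int :=
  shape.foldl (fun n d => n * d) 1

-- itertools.product(*ranges): leftmost factor varies slowest, yields tuples in
-- lexicographic order of the given ranges (exact order of itertools.product).
-- (like itertools.product, an empty pool yields nothing at once — same value as
-- the general clause, see pvProductA_cons below)
def pvProductA : List (List Int) → List (List Int)
  | [] => [[]]
  | [] :: _ => []
  | r :: rs =>
    let rest := pvProductA rs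
    r.flatMap (fun i => rest.map (fun t => i :: t))

def full_shape_footprint (shape : List Int) : Option (List (List Int)) :=
  let total := shape_element_count shape
  if total > 200000 then none
  else
    -- out = set(); for idx in product(...): out.add(tuple(idx))
    some ((pvProductA (shape.map (fun d => PySem.List.pyRange 1 (d + 1) 1))).foldl
            (fun out idx => PySem.Set.add out idx) PySem.Set.empty)

-- ===== PORT B =====
-- digits = []; r = k; for d in reversed(shape): r, q = divmod(r, d); digits.append(q+1)
-- return tuple(reversed(digits))
def pvDecodeB (shape : List Int) (k : Int) : List Int :=
  let st := shape.reverse.foldl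
    (fun (p : Int × List Int) d =>
      (PySem.Int.floordiv p.1 d, p.2 ++ [PySem.Int.mod p.1 d + 1])) (k, [])
  st.2.reverse

def full_shape_footprint_alt (shape : List Int) : Option (List (List Int)) :=
  let total := shape.foldl (fun n d => n * d) 1
  if total > 200000 then none
  else if shape.any (fun d => d ≤ 0) then some []
  else
    -- out = set(); for k in range(total): out.add(decode(k))
    some ((PySem.List.pyRange 0 total 1).foldl
            (fun out k => PySem.Set.add out (pvDecodeB shape k)) PySem.Set.empty)

-- ===== PRECONDITION & SPEC =====
def Spec_full_shape_footprint (shape : List Int) (out : Option (List (List Int))) : Prop := out = full_shape_footprint_alt shape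
instance (shape : List Int) (out : Option (List (List Int))) : Decidable (Spec_full_shape_footprint shape out) := by unfold Spec_full_shape_footprint; infer_instance

-- ===== CLAIM (what is proved, stated in full; the proofs are below) =====
def Claim_equal_full_shape_footprint : Prop := ∀ (shape : List Int), Dom_full_shape_footprint shape → Spec_full_shape_footprint shape (full_shape_footprint shape)

-- ===== LEMMAS AND PROOFS =====

-- the short-circuit clause of pvProductA agrees with the general one
theorem pvProductA_cons (r : List Int) (rs : List (List Int)) :
    pvProductA (r :: rs) = r.flatMap (fun i => (pvProductA rs).map (fun t => i :: t)) := by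
  cases r <;> rfl

-- A nonpositive dimension makes its range empty and hence the whole product empty.
theorem pvProductA_eq_nil_of_mem_nil {rs : List (List Int)} (h : [] ∈ rs) :
    pvProductA rs = [] := by
  induction rs with
  | nil => cases h
  | cons r rs ih =>
    rcases List.mem_cons.mp h with h1 | h2
    · simp [pvProductA_cons, ← h1]
    · simp [pvProductA_cons, ih h2]

-- total number of elements, at Nat level
def pvPn (shape : List Int) : Nat := (shape.map Int.toNat).prod

-- reference decoder: the digits of a rank j < pvPn shape, front dimension first
def pvDecodeN : List Int → Nat → List Int
  | [], _ => []
  | _d :: ds, j => (((j / pvPn ds : Nat) : Int) + 1) :: pvDecodeN ds (j % pvPn ds)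

-- the digits pvDecodeB's loop produces, in production order (last dimension first)
def pvDigitsRev : List Int → Int → List Int
  | [], _ => []
  | e :: es, k => (PySem.Int.mod k e + 1) :: pvDigitsRev es (PySem.Int.floordiv k e)

theorem pvFold_char (l : List Int) : ∀ (k : Int) (acc : List Int),
    l.foldl (fun (p : Int × List Int) d =>
        (PySem.Int.floordiv p.1 d, p.2 ++ [PySem.Int.mod p.1 d + 1])) (k, acc)
      = (l.foldl (fun r e => PySem.Int.floordiv r e) k, acc ++ pvDigitsRev l k) := by
  induction l with
  | nil => intro k acc; simp [pvDigitsRev]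
  | cons e es ih => intro k acc; simp [List.foldl_cons, ih, pvDigitsRev]

theorem pvDecodeB_eq (shape : List Int) (k : Int) :
    pvDecodeB shape k = (pvDigitsRev shape.reverse k).reverse := by
  unfold pvDecodeB
  rw [pvFold_char]
  simp

theorem pvDigitsRev_append (l1 l2 : List Int) (k : Int) :
    pvDigitsRev (l1 ++ l2) k
      = pvDigitsRev l1 k ++ pvDigitsRev l2 (l1.foldl (fun r e => PySem.Int.floordiv r e) k) := by
  induction l1 generalizing k with
  | nil => simp [pvDigitsRev]
  | cons e es ih => simp [pvDigitsRev, ih]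

theorem pvDecodeB_cons (d : Int) (es : List Int) (k : Int) :
    pvDecodeB (d :: es) k
      = (PySem.Int.mod (es.reverse.foldl (fun r e => PySem.Int.floordiv r e) k) d + 1)
          :: pvDecodeB es k := by
  simp [pvDecodeB_eq, List.reverse_cons, pvDigitsRev_append, pvDigitsRev]

-- dividing by all tail dimensions in turn is division by their product
theorem pvRAll_eq (es : List Int) (hpos : ∀ e ∈ es, 1 ≤ e) (m : Nat) :
    es.reverse.foldl (fun r e => PySem.Int.floordiv r e) (m : Int)
      = ((m / pvPn es : Nat) : Int) := by
  induction es generalizing m with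
  | nil => simp [pvPn]
  | cons e es ih =>
    have he : 1 ≤ e := hpos e (List.mem_cons_self ..)
    have ih' := ih (fun x hx => hpos x (List.mem_cons_of_mem _ hx)) m
    have hcast : e = ((e.toNat : Nat) : Int) := by omega
    rw [List.reverse_cons, List.foldl_append, ih', List.foldl_cons, List.foldl_nil, hcast,
      PySem.Int.floordiv_natCast, Nat.div_div_eq_div_mul]
    congr 1
    simp only [pvPn, List.map_cons, List.prod_cons, Int.toNat_natCast]
    rw [Nat.mul_comm]

theorem pvPn_pos (es : List Int) (hpos : ∀ e ∈ es, 1 ≤ e) : 0 < pvPn es := by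
  induction es with
  | nil => simp [pvPn]
  | cons e es ih =>
    have he : 1 ≤ e := hpos e (List.mem_cons_self ..)
    have := ih (fun x hx => hpos x (List.mem_cons_of_mem _ hx))
    simp only [pvPn, List.map_cons, List.prod_cons] at *
    exact Nat.mul_pos (by omega) this

-- pointwise: decoding rank c*P + j (j < P) ignores the multiple of P, yielding j's digits
theorem pvDecodeB_ofRank (shape : List Int) (hpos : ∀ d ∈ shape, 1 ≤ d) :
    ∀ (c j : Nat), j < pvPn shape →
      pvDecodeB shape ((c * pvPn shape + j : Nat) : Int) = pvDecodeN shape j := by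
  induction shape with
  | nil =>
    intro c j hj
    have hj0 : j = 0 := by simp [pvPn] at hj; omega
    subst hj0
    rfl
  | cons d es ih =>
    intro c j hj
    have hd : 1 ≤ d := hpos d (List.mem_cons_self ..)
    have hpos' : ∀ e ∈ es, 1 ≤ e := fun x hx => hpos x (List.mem_cons_of_mem _ hx)
    have hP : 0 < pvPn es := pvPn_pos es hpos'
    set t := d.toNat with ht
    have hPn : pvPn (d :: es) = t * pvPn es := by simp [pvPn, ht]
    have hjP : j / pvPn es < t := by
      apply Nat.div_lt_of_lt_mul
      rw [Nat.mul_comm, ← hPn]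
      exact hj
    have hdivP : (c * pvPn (d :: es) + j) / pvPn es = c * t + j / pvPn es := by
      have h1 : c * pvPn (d :: es) + j = pvPn es * (c * t) + j := by rw [hPn]; ring
      rw [h1, Nat.mul_add_div hP]
    have hsplit : c * pvPn (d :: es) + j
        = (c * t + j / pvPn es) * pvPn es + j % pvPn es := by
      have h := Nat.div_add_mod j (pvPn es)
      calc c * pvPn (d :: es) + j
          = c * pvPn (d :: es) + (pvPn es * (j / pvPn es) + j % pvPn es) := by rw [h]
        _ = (c * t + j / pvPn es) * pvPn es + j % pvPn es := by rw [hPn]; ring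
    rw [pvDecodeB_cons, pvRAll_eq es hpos', hdivP]
    have hdc : d = ((t : Nat) : Int) := by omega
    have hmod : PySem.Int.mod ((c * t + j / pvPn es : Nat) : Int) d
        = ((j / pvPn es : Nat) : Int) := by
      rw [hdc, PySem.Int.mod_natCast]
      congr 1
      have h2 : c * t + j / pvPn es = j / pvPn es + c * t := by ring
      rw [h2, Nat.add_mul_mod_self_right, Nat.mod_eq_of_lt hjP]
    rw [hmod]
    have htail : pvDecodeB es ((c * pvPn (d :: es) + j : Nat) : Int)
        = pvDecodeN es (j % pvPn es) := by
      rw [hsplit]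
      exact ih hpos' _ _ (Nat.mod_lt _ hP)
    rw [htail]
    rfl

-- List.range of a product, as ranks grouped by leading digit
theorem pvRange_mul (a b : Nat) :
    List.range (a * b)
      = (List.range a).flatMap (fun i => (List.range b).map (fun m => i * b + m)) := by
  induction a with
  | zero => simp
  | succ a ih =>
    have h1 : (a + 1) * b = a * b + b := by ring
    rw [h1, List.range_add, ih, List.range_succ, List.flatMap_append]
    simp [Nat.mul_comm]

-- decoding all ranks in order produces exactly itertools.product's tuple list
theorem pvMap_decodeN (shape : List Int) (hpos : ∀ d ∈ shape, 1 ≤ d) :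
    (List.range (pvPn shape)).map (pvDecodeN shape)
      = pvProductA (shape.map (fun d => PySem.List.pyRange 1 (d + 1) 1)) := by
  induction shape with
  | nil => simp [pvPn, pvProductA, pvDecodeN]
  | cons d es ih =>
    have hd : 1 ≤ d := hpos d (List.mem_cons_self ..)
    have hpos' : ∀ e ∈ es, 1 ≤ e := fun x hx => hpos x (List.mem_cons_of_mem _ hx)
    have hP : 0 < pvPn es := pvPn_pos es hpos'
    have hPn : pvPn (d :: es) = d.toNat * pvPn es := by simp [pvPn]
    have hrange : PySem.List.pyRange 1 (d + 1) 1
        = (List.range d.toNat).map (fun k : Nat => 1 + (k : Int)) := by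
      rw [PySem.List.pyRange_one]
      congr 2
      omega
    rw [List.map_cons, pvProductA_cons, hrange, List.flatMap_map, ← ih hpos',
      hPn, pvRange_mul, List.map_flatMap]
    refine congrArg (fun f => List.flatMap f (List.range d.toNat)) (funext fun i => ?_)
    rw [List.map_map, List.map_map]
    refine List.map_congr_left (fun m hm => ?_)
    have hm' : m < pvPn es := List.mem_range.mp hm
    show pvDecodeN (d :: es) (i * pvPn es + m) = (1 + (i : Int)) :: pvDecodeN es m
    have h1 : i * pvPn es + m = pvPn es * i + m := by ring
    simp only [pvDecodeN, h1, Nat.mul_add_div hP, Nat.mul_add_mod,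
      Nat.div_eq_of_lt hm', Nat.mod_eq_of_lt hm', Nat.add_zero]
    congr 1
    ring

-- the running product, as a Nat product
theorem pvFoldMul (shape : List Int) : ∀ (i : Int),
    shape.foldl (fun n d => n * d) i = i * shape.prod := by
  induction shape with
  | nil => intro i; simp
  | cons d es ih => intro i; simp [List.foldl_cons, ih, List.prod_cons]; ring

theorem pvTotal_eq (shape : List Int) (hpos : ∀ d ∈ shape, 1 ≤ d) :
    shape.foldl (fun n d => n * d) 1 = ((pvPn shape : Nat) : Int) := by
  rw [pvFoldMul, one_mul]
  induction shape with
  | nil => simp [pvPn]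
  | cons d es ih =>
    have hd : 1 ≤ d := hpos d (List.mem_cons_self ..)
    have ih' := ih (fun x hx => hpos x (List.mem_cons_of_mem _ hx))
    simp only [List.prod_cons, pvPn, List.map_cons] at *
    rw [ih']
    push_cast
    congr 1
    omega

-- ===== VERDICT (by name: the statement is the Claim_ definition above) =====
theorem full_shape_footprint_spec : Claim_equal_full_shape_footprint := by
  intro shape _
  unfold Spec_full_shape_footprint full_shape_footprint full_shape_footprint_alt shape_element_count
  by_cases hcap : shape.foldl (fun n d => n * d) 1 > 200000
  · simp [hcap]
  · by_cases hz : shape.any (fun d => decide (d ≤ 0)) = true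
    · obtain ⟨d, hd, hdle⟩ := List.any_eq_true.mp hz
      have hdle' : d ≤ 0 := of_decide_eq_true hdle
      have hrange : PySem.List.pyRange 1 (d + 1) 1 = [] := by
        rw [PySem.List.pyRange_one]
        simp only [List.map_eq_nil_iff, List.range_eq_nil]
        omega
      have hmem : ([] : List Int) ∈ shape.map (fun d => PySem.List.pyRange 1 (d + 1) 1) :=
        List.mem_map.mpr ⟨d, hd, hrange⟩
      simp [hcap, hz, pvProductA_eq_nil_of_mem_nil hmem]
    · have hpos : ∀ d ∈ shape, 1 ≤ d := by
        intro d hd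
        by_contra h
        exact hz (List.any_eq_true.mpr ⟨d, hd, by simpa using (by omega : d ≤ 0)⟩)
      have htot := pvTotal_eq shape hpos
      have hlist : (List.range (pvPn shape)).map (fun j : Nat => pvDecodeB shape (0 + (j : Int)))
          = pvProductA (shape.map (fun d => PySem.List.pyRange 1 (d + 1) 1)) := by
        rw [List.map_congr_left (fun j hj => by
          have hj' : j < pvPn shape := List.mem_range.mp hj
          have hc : (0 : Int) + (j : Int) = ((0 * pvPn shape + j : Nat) : Int) := by push_cast; ring
          rw [hc, pvDecodeB_ofRank shape hpos 0 j hj'])]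
        exact pvMap_decodeN shape hpos
      simp only [gt_iff_lt, hz, Bool.false_eq_true, if_false, htot]
      have hcap2 : ¬ (200000 : Int) < ((pvPn shape : Nat) : Int) := by
        rw [← htot]; exact hcap
      rw [if_neg hcap2, if_neg hcap2]
      congr 1
      rw [← hlist, List.foldl_map, PySem.List.pyRange_one]
      simp [List.foldl_map]
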